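-- pv_equiv track=rewrite | github.com/Ericdataplus/local_model_poke | src/pathfinding.py | get_path_to_exit
-- ===== SOURCE A (Python) =====
-- def get_path_to_exit(player_x, player_y, exit_x, exit_y):
--     """
--     Calculate the sequence of moves to reach an exit.
--     Returns a list of directions: ['right', 'right', 'up', 'up', ...]
--
--     Uses simple greedy pathfinding (move closer on each axis).
--     """
--     path = []
--     current_x, current_y = player_x, player_y
--
--     # Move horizontally first
--     while current_x != exit_x:
--         if current_x < exit_x:
--             path.append('right')
--             current_x += 1
--         else:
--             path.append('left')
--             current_x -= 1
--
--     # Then move vertically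
--     while current_y != exit_y:
--         if current_y < exit_y:
--             path.append('down')
--             current_y += 1
--         else:
--             path.append('up')
--             current_y -= 1
--
--     return path
-- ===== SOURCE B (Python) =====
-- def get_path_to_exit(player_x, player_y, exit_x, exit_y):
--     dx = exit_x - player_x
--     dy = exit_y - player_y
--     horiz = ['right'] * dx if dx > 0 else ['left'] * (-dx)
--     vert = ['down'] * dy if dy > 0 else ['up'] * (-dy)
--     return horiz + vert
-- ===== Notes on version B (the rewrite author's own statement) =====
-- stated objective: simpler
-- what changed: Replaces the two cell-by-cell while loops with closed-form deltas dx/dy whose signs pick the direction label and whose magnitudes are the run lengths, built once via list multiplication.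
import Mathlib
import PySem

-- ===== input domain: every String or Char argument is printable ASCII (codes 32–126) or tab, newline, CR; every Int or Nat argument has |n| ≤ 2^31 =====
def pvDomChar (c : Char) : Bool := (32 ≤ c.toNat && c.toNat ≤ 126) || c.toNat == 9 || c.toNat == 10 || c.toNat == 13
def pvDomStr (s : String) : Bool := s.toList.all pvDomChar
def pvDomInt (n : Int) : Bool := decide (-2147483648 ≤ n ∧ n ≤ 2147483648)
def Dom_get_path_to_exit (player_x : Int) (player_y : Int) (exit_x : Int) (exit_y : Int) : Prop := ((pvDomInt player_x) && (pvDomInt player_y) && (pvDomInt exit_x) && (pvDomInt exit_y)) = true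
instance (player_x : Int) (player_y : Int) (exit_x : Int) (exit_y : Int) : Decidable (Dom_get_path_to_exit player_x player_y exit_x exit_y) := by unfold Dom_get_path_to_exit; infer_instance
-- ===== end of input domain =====

-- ===== PORT A =====
-- B vs A: closed-form deltas instead of cell-by-cell while loops (objective: simpler).
-- while current_x != exit_x: append 'right'/'left', step current_x by ±1
def pvGoX (cur ex : Int) (path : List String) : List String :=
  if cur ≠ ex then
    if cur < ex then pvGoX (cur + 1) ex (path ++ ["right"])
    else pvGoX (cur - 1) ex (path ++ ["left"])
  else path
termination_by (ex - cur).natAbs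
decreasing_by all_goals omega

-- while current_y != exit_y: append 'down'/'up', step current_y by ±1
def pvGoY (cur ex : Int) (path : List String) : List String :=
  if cur ≠ ex then
    if cur < ex then pvGoY (cur + 1) ex (path ++ ["down"])
    else pvGoY (cur - 1) ex (path ++ ["up"])
  else path
termination_by (ex - cur).natAbs
decreasing_by all_goals omega

def get_path_to_exit (player_x : Int) (player_y : Int) (exit_x : Int) (exit_y : Int) : List String :=
  pvGoY player_y exit_y (pvGoX player_x exit_x [])

-- ===== PORT B =====
def get_path_to_exit_alt (player_x : Int) (player_y : Int) (exit_x : Int) (exit_y : Int) : List String :=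
  let dx := exit_x - player_x
  let dy := exit_y - player_y
  let horiz := if dx > 0 then List.replicate dx.toNat "right" else List.replicate (-dx).toNat "left"
  let vert := if dy > 0 then List.replicate dy.toNat "down" else List.replicate (-dy).toNat "up"
  horiz ++ vert

-- ===== PRECONDITION & SPEC =====
def Spec_get_path_to_exit (player_x : Int) (player_y : Int) (exit_x : Int) (exit_y : Int) (out : List String) : Prop := out = get_path_to_exit_alt player_x player_y exit_x exit_y
instance (player_x : Int) (player_y : Int) (exit_x : Int) (exit_y : Int) (out : List String) : Decidable (Spec_get_path_to_exit player_x player_y exit_x exit_y out) := by unfold Spec_get_path_to_exit; infer_instance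

-- ===== CLAIM (what is proved, stated in full; the proofs are below) =====
def Claim_equal_get_path_to_exit : Prop := ∀ (player_x : Int) (player_y : Int) (exit_x : Int) (exit_y : Int), Dom_get_path_to_exit player_x player_y exit_x exit_y → Spec_get_path_to_exit player_x player_y exit_x exit_y (get_path_to_exit player_x player_y exit_x exit_y)

-- ===== LEMMAS AND PROOFS =====
theorem pvGoX_eq (cur ex : Int) (path : List String) :
    pvGoX cur ex path =
      path ++ (if ex - cur > 0 then List.replicate (ex - cur).toNat "right"
               else List.replicate (-(ex - cur)).toNat "left") := by
  fun_induction pvGoX cur ex path with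
  | case1 cur path hne hlt ih =>
      rw [ih]
      have h1 : ex - cur > 0 := by omega
      have h2 : ex - (cur + 1) ≥ 0 := by omega
      simp only [if_pos h1, List.append_assoc]
      split_ifs with h3
      · congr 1
        have : (ex - cur).toNat = (ex - (cur + 1)).toNat + 1 := by omega
        rw [this, List.replicate_succ]
        rfl
      · have : ex - (cur + 1) = 0 := by omega
        have h4 : (ex - cur).toNat = 1 := by omega
        simp [this, h4]
  | case2 cur path hne hlt ih =>
      rw [ih]
      have h1 : ¬ ex - cur > 0 := by omega
      simp only [if_neg h1, List.append_assoc]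
      split_ifs with h3
      · omega
      · congr 1
        have : (-(ex - cur)).toNat = (-(ex - (cur - 1))).toNat + 1 := by omega
        rw [this, List.replicate_succ]
        rfl
  | case3 cur path hne =>
      have h0 : ex - cur = 0 := by omega
      simp [h0]

theorem pvGoY_eq (cur ex : Int) (path : List String) :
    pvGoY cur ex path =
      path ++ (if ex - cur > 0 then List.replicate (ex - cur).toNat "down"
               else List.replicate (-(ex - cur)).toNat "up") := by
  fun_induction pvGoY cur ex path with
  | case1 cur path hne hlt ih =>
      rw [ih]
      have h1 : ex - cur > 0 := by omega
      simp only [if_pos h1, List.append_assoc]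
      split_ifs with h3
      · congr 1
        have : (ex - cur).toNat = (ex - (cur + 1)).toNat + 1 := by omega
        rw [this, List.replicate_succ]
        rfl
      · have : ex - (cur + 1) = 0 := by omega
        have h4 : (ex - cur).toNat = 1 := by omega
        simp [this, h4]
  | case2 cur path hne hlt ih =>
      rw [ih]
      have h1 : ¬ ex - cur > 0 := by omega
      simp only [if_neg h1, List.append_assoc]
      split_ifs with h3
      · omega
      · congr 1
        have : (-(ex - cur)).toNat = (-(ex - (cur - 1))).toNat + 1 := by omega
        rw [this, List.replicate_succ]
        rfl
  | case3 cur path hne =>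
      have h0 : ex - cur = 0 := by omega
      simp [h0]

-- ===== VERDICT (by name: the statement is the Claim_ definition above) =====
theorem get_path_to_exit_spec : Claim_equal_get_path_to_exit := by
  intro px py ex ey _
  unfold Spec_get_path_to_exit get_path_to_exit get_path_to_exit_alt
  rw [pvGoX_eq, pvGoY_eq, List.nil_append]
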